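-- pv_equiv track=rewrite | github.com/cmudrc/MAS-Aviary | scripts/plot_final.py | _build_tier
-- ===== SOURCE A (Python) =====
-- TOOL_GROUPS = [
--     (
--         "Orchestrator",
--         [
--             "list_available_tools",
--             "list_graph_roles",
--             "create_agent",
--             "assign_task",
--         ],
--     ),
--     ("Mission Architect", ["create_session", "configure_mission"]),
--     ("Aero / Propulsion", ["get_design_space", "set_aircraft_parameters", "validate_parameters"]),
--     ("Simulation Executor", ["run_simulation", "get_results"]),
--     ("MDO Integrator", ["check_constraints", "mark_task_done"]),
--     ("Blackboard", ["write_blackboard", "read_blackboard"]),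
-- ]
--
-- TIER_GROUPS = {
--     "sequential": ["Mission Architect", "Aero / Propulsion", "Simulation Executor", "MDO Integrator"],
--     "orchestrated": ["Orchestrator", "Mission Architect", "Aero / Propulsion", "Simulation Executor", "MDO Integrator"],
--     "networked": ["Mission Architect", "Aero / Propulsion", "Simulation Executor", "MDO Integrator", "Blackboard"],
-- }
--
-- GROUP_TOOL_MAP = {name: tools for name, tools in TOOL_GROUPS}
--
-- def _build_tier(key):
--     """Return (tool_list, group_spans) for the tier matching this combo key."""
--     for tier_name in ("sequential", "orchestrated", "networked"):
--         if tier_name in key: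
--             group_names = TIER_GROUPS[tier_name]
--             break
--     else:
--         group_names = [name for name, _ in TOOL_GROUPS]
--
--     tools = []
--     spans = []
--     for gn in group_names:
--         start = len(tools)
--         tools.extend(GROUP_TOOL_MAP[gn])
--         spans.append((gn, start, len(tools)))
--     return tools, spans
-- ===== SOURCE B (Python) =====
-- TOOL_GROUPS = [
--     (
--         "Orchestrator",
--         [
--             "list_available_tools",
--             "list_graph_roles",
--             "create_agent",
--             "assign_task",
--         ],
--     ),
--     ("Mission Architect", ["create_session", "configure_mission"]),
--     ("Aero / Propulsion", ["get_design_space", "set_aircraft_parameters", "validate_parameters"]),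
--     ("Simulation Executor", ["run_simulation", "get_results"]),
--     ("MDO Integrator", ["check_constraints", "mark_task_done"]),
--     ("Blackboard", ["write_blackboard", "read_blackboard"]),
-- ]
--
-- TIER_GROUPS = {
--     "sequential": ["Mission Architect", "Aero / Propulsion", "Simulation Executor", "MDO Integrator"],
--     "orchestrated": ["Orchestrator", "Mission Architect", "Aero / Propulsion", "Simulation Executor", "MDO Integrator"],
--     "networked": ["Mission Architect", "Aero / Propulsion", "Simulation Executor", "MDO Integrator", "Blackboard"],
-- }
--
-- GROUP_TOOL_MAP = {name: tools for name, tools in TOOL_GROUPS}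
--
--
-- def _assemble(names):
--     """Recursively build (tools, spans) back-to-front: assemble the tail, then
--     prepend this group's tools and shift the tail's spans by their length."""
--     if not names:
--         return [], []
--     gn = names[0]
--     g = GROUP_TOOL_MAP[gn]
--     k = len(g)
--     tools_rest, spans_rest = _assemble(names[1:])
--     return g + tools_rest, [(gn, 0, k)] + [(n, s + k, e + k) for (n, s, e) in spans_rest]
--
--
-- def _build_tier(key):
--     """Return (tool_list, group_spans) for the tier matching this combo key."""
--     tier = next((t for t in ("sequential", "orchestrated", "networked") if t in key), None)
--     if tier is None:
--         names = [name for name, _ in TOOL_GROUPS]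
--     else:
--         names = TIER_GROUPS[tier]
--     return _assemble(names)
-- ===== Notes on version B (the rewrite author's own statement) =====
-- stated objective: alternative
-- what changed: Replaces A's forward loop that interleaves tools-extension with inline span bookkeeping by a recursion on the group list that builds the result back-to-front: assemble the tail's (tools, spans), then prepend the head group's tools and shift every tail span by that group's length.
import Mathlib
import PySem

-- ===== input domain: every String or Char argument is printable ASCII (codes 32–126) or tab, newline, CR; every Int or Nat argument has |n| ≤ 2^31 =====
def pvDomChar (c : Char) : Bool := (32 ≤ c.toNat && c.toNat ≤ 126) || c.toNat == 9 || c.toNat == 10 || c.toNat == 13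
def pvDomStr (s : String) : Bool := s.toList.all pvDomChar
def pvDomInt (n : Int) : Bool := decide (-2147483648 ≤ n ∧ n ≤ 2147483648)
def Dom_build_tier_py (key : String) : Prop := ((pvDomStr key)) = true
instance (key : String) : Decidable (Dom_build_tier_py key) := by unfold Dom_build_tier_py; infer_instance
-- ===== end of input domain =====

-- B replaces A's forward accumulate loop by a recursion over the group list that builds
-- (tools, spans) back-to-front, shifting the tail's spans (objective: alternative).

-- ===== PORT A =====
def pvTOOL_GROUPS : List (String × List String) :=
  [("Orchestrator", ["list_available_tools", "list_graph_roles", "create_agent", "assign_task"]), ("Mission Architect", ["create_session", "configure_mission"]), ("Aero / Propulsion", ["get_design_space", "set_aircraft_parameters", "validate_parameters"]), ("Simulation Executor", ["run_simulation", "get_results"]), ("MDO Integrator", ["check_constraints", "mark_task_done"]), ("Blackboard", ["write_blackboard", "read_blackboard"])]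

def pvTIER_GROUPS : PySem.Dict String (List String) :=
  PySem.Dict.ofList [("sequential", ["Mission Architect", "Aero / Propulsion", "Simulation Executor", "MDO Integrator"]), ("orchestrated", ["Orchestrator", "Mission Architect", "Aero / Propulsion", "Simulation Executor", "MDO Integrator"]), ("networked", ["Mission Architect", "Aero / Propulsion", "Simulation Executor", "MDO Integrator", "Blackboard"])]

def pvGROUP_TOOL_MAP : PySem.Dict String (List String) :=
  pvTOOL_GROUPS.foldl (fun d p => PySem.Dict.insert d p.1 p.2) PySem.Dict.empty

-- A's for/else+break over ("sequential","orchestrated","networked"); TIER_GROUPS[t] is only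
-- reached for t a key of pvTIER_GROUPS, so getD's default is never used
def pvTierLoopA (key : String) : List String → List String
  | [] => pvTOOL_GROUPS.map (·.1)
  | t :: rest =>
    if PySem.Str.isIn t key then PySem.Dict.getD pvTIER_GROUPS t [] else pvTierLoopA key rest

def build_tier_py (key : String) : List String × (List (String × Int × Int)) :=
  let group_names := pvTierLoopA key ["sequential", "orchestrated", "networked"]
  group_names.foldl
    (fun st gn =>
      let start : Int := st.1.length
      let tools := st.1 ++ PySem.Dict.getD pvGROUP_TOOL_MAP gn []
      (tools, st.2 ++ [(gn, start, (tools.length : Int))]))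
    ([], [])

-- ===== PORT B =====
-- Source B's recursive _assemble: build the tail, prepend head's tools, shift tail spans
def pvAssemble : List String → List String × (List (String × Int × Int))
  | [] => ([], [])
  | gn :: rest =>
    let g := PySem.Dict.getD pvGROUP_TOOL_MAP gn []
    let k : Int := g.length
    let r := pvAssemble rest
    (g ++ r.1, (gn, 0, k) :: r.2.map (fun p => (p.1, p.2.1 + k, p.2.2 + k)))

def build_tier_py_alt (key : String) : List String × (List (String × Int × Int)) :=
  let tier := (["sequential", "orchestrated", "networked"].find? (fun t => PySem.Str.isIn t key))
  let names := match tier with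
    | none => pvTOOL_GROUPS.map (·.1)
    | some t => PySem.Dict.getD pvTIER_GROUPS t []
  pvAssemble names

-- ===== PRECONDITION & SPEC =====
def Spec_build_tier_py (key : String) (out : List String × (List (String × Int × Int))) : Prop := out = build_tier_py_alt key
instance (key : String) (out : List String × (List (String × Int × Int))) : Decidable (Spec_build_tier_py key out) := by unfold Spec_build_tier_py; infer_instance

-- ===== CLAIM =====
def Claim_equal_build_tier_py : Prop := ∀ (key : String), Dom_build_tier_py key → Spec_build_tier_py key (build_tier_py key)

-- ===== LEMMAS AND PROOFS =====
-- B's find?-based selection picks the same group list as A's for/else loop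
theorem pvSelect_eq (key : String) :
    (match (["sequential", "orchestrated", "networked"].find? (fun t => PySem.Str.isIn t key)) with
      | none => pvTOOL_GROUPS.map (·.1)
      | some t => PySem.Dict.getD pvTIER_GROUPS t []) =
    pvTierLoopA key ["sequential", "orchestrated", "networked"] := by
  simp only [List.find?, pvTierLoopA]
  split_ifs <;> simp_all

theorem pvTier_cases (key : String) :
    pvTierLoopA key ["sequential", "orchestrated", "networked"] =
      ["Mission Architect", "Aero / Propulsion", "Simulation Executor", "MDO Integrator"] ∨
    pvTierLoopA key ["sequential", "orchestrated", "networked"] =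
      ["Orchestrator", "Mission Architect", "Aero / Propulsion", "Simulation Executor", "MDO Integrator"] ∨
    pvTierLoopA key ["sequential", "orchestrated", "networked"] =
      ["Mission Architect", "Aero / Propulsion", "Simulation Executor", "MDO Integrator", "Blackboard"] ∨
    pvTierLoopA key ["sequential", "orchestrated", "networked"] =
      pvTOOL_GROUPS.map (·.1) := by
  simp only [pvTierLoopA]
  split_ifs <;> decide

-- A's body as a function of the selected group list
def pvBodyA (group_names : List String) : List String × (List (String × Int × Int)) :=
  group_names.foldl
    (fun st gn =>
      let start : Int := st.1.length
      let tools := st.1 ++ PySem.Dict.getD pvGROUP_TOOL_MAP gn []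
      (tools, st.2 ++ [(gn, start, (tools.length : Int))]))
    ([], [])

-- ===== VERDICT =====
theorem build_tier_py_spec : Claim_equal_build_tier_py := by
  intro key _
  unfold Spec_build_tier_py
  show pvBodyA (pvTierLoopA key ["sequential", "orchestrated", "networked"]) =
    pvAssemble (match (["sequential", "orchestrated", "networked"].find? (fun t => PySem.Str.isIn t key)) with
      | none => pvTOOL_GROUPS.map (·.1)
      | some t => PySem.Dict.getD pvTIER_GROUPS t [])
  rw [pvSelect_eq]
  rcases pvTier_cases key with h | h | h | h <;> rw [h] <;> decide
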